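-- pv_equiv track=rewrite | github.com/kids-first/kf-api-study-creator | creator/buckets/tasks.py | condense_ext
-- ===== SOURCE A (Python) =====
-- def condense_ext(r):
--     """
--     'Condenses' a file extension by removing any unecessary components. Eg:
--     .vep.vcf.gz.tbi -> .vcf.gz.tbi
--     .gatk.filtered.FINAL.vcf.gz -> .vcf.gz
--     """
--     d = [
--         ".g.vcf.gz.tbi",
--         ".g.vcf.gz",
--         ".vcf.gz.tbi",
--         ".vcf.gz",
--         ".tsv.gz",
--         ".maf",
--         ".png",
--         ".html",
--         ".pdf",
--         ".txt.gz",
--         ".txt",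
--         ".bam",
--         ".log.gz",
--         ".log",
--     ]
--     for ext in d:
--         if r.endswith(ext):
--             return ext
--     return ""
-- ===== SOURCE B (Python) =====
-- _EXTS = frozenset([
--     ".g.vcf.gz.tbi",
--     ".g.vcf.gz",
--     ".vcf.gz.tbi",
--     ".vcf.gz",
--     ".tsv.gz",
--     ".maf",
--     ".png",
--     ".html",
--     ".pdf",
--     ".txt.gz",
--     ".txt",
--     ".bam",
--     ".log.gz",
--     ".log",
-- ])
--
--
-- def condense_ext(r):
--     # Walk r's own dot-anchored suffixes, longest first; the first one found
--     # in the extension set is the answer (no earlier list element of the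
--     # original priority list is ever a proper suffix of a later one, so
--     # longest-match equals the list's priority order).
--     for i, c in enumerate(r):
--         if c == "." and r[i:] in _EXTS:
--             return r[i:]
--     return ""
-- ===== Notes on version B (the rewrite author's own statement) =====
-- stated objective: alternative
-- what changed: Instead of scanning the fixed 14-element priority list with endswith, B walks the input's own dot-anchored suffixes longest-first and returns the first one found in a frozenset of the extensions (valid because no earlier list element is a proper suffix of a later one, so longest match equals list priority).
import Mathlib
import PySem

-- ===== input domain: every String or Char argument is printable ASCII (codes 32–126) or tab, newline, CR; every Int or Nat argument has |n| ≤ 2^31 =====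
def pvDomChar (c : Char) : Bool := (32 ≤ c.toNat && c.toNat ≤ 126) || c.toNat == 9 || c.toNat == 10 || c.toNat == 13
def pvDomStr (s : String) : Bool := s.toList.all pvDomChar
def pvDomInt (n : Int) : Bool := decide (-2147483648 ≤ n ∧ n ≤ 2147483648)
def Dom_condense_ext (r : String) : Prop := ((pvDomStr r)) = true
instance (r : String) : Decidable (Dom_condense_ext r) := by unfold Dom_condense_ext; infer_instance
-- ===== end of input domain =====

-- B replaces the fixed-priority endswith scan by a longest-first walk over r's own dot-anchored
-- suffixes with set membership (alternative decomposition; return values identical).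

-- ===== PORT A =====
-- A's fixed extension list, in its priority order.
def pvExtList : List String := [
  ".g.vcf.gz.tbi",
  ".g.vcf.gz",
  ".vcf.gz.tbi",
  ".vcf.gz",
  ".tsv.gz",
  ".maf",
  ".png",
  ".html",
  ".pdf",
  ".txt.gz",
  ".txt",
  ".bam",
  ".log.gz",
  ".log"]

-- A's loop: first ext in the list with r.endswith(ext), else "".
def pvALoop (r : String) : List String → String
  | [] => ""
  | e :: es => if PySem.Str.endswith r e then e else pvALoop r es

def condense_ext (r : String) : String := pvALoop r pvExtList

-- ===== PORT B =====
-- the frozenset of extensions, as their character lists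
def pvExts : List (List Char) := [
  ".g.vcf.gz.tbi".toList,
  ".g.vcf.gz".toList,
  ".vcf.gz.tbi".toList,
  ".vcf.gz".toList,
  ".tsv.gz".toList,
  ".maf".toList,
  ".png".toList,
  ".html".toList,
  ".pdf".toList,
  ".txt.gz".toList,
  ".txt".toList,
  ".bam".toList,
  ".log.gz".toList,
  ".log".toList]

-- B's loop over enumerate(r): the current suffix r[i:] is the list argument;
-- "c == '.' and r[i:] in _EXTS" is the condition.
def pvBAux : List Char → List Char
  | [] => []
  | c :: cs => if c = '.' ∧ (c :: cs) ∈ pvExts then c :: cs else pvBAux cs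

def condense_ext_alt (r : String) : String := String.ofList (pvBAux r.toList)

-- ===== PRECONDITION & SPEC =====
def Spec_condense_ext (r : String) (out : String) : Prop := out = condense_ext_alt r
instance (r : String) (out : String) : Decidable (Spec_condense_ext r out) := by unfold Spec_condense_ext; infer_instance

-- ===== CLAIM (what is proved, stated in full; the proofs are below) =====
def Claim_equal_condense_ext : Prop := ∀ (r : String), Dom_condense_ext r → Spec_condense_ext r (condense_ext r)

-- ===== LEMMAS AND PROOFS =====

-- the set holds exactly the list's elements (as char lists)
theorem pvExts_eq : pvExts = pvExtList.map String.toList := by decide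

-- every extension starts with '.'
theorem pvExts_head (e : List Char) (he : e ∈ pvExts) : e.head? = some '.' := by
  fin_cases he <;> rfl

-- any extension that is a suffix of l is a suffix of pvBAux l
theorem pvBAux_longest (l e : List Char) (he : e ∈ pvExts) (hs : e <:+ l) :
    e <:+ pvBAux l := by
  induction l with
  | nil =>
      simp only [List.suffix_nil] at hs
      simp [pvBAux, hs]
  | cons c cs ih =>
      by_cases h : c = '.' ∧ (c :: cs) ∈ pvExts
      · rw [pvBAux, if_pos h]; exact hs
      · rw [pvBAux, if_neg h]
        rcases List.suffix_cons_iff.mp hs with h1 | h2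
        · exfalso
          apply h
          have hd := pvExts_head e he
          subst h1
          simp at hd
          exact ⟨hd, he⟩
        · exact ih h2

-- pvBAux returns "" or a member of the set that is a suffix of l
theorem pvBAux_sound (l : List Char) :
    pvBAux l = [] ∨ (pvBAux l ∈ pvExts ∧ pvBAux l <:+ l) := by
  induction l with
  | nil => exact Or.inl rfl
  | cons c cs ih =>
      by_cases h : c = '.' ∧ (c :: cs) ∈ pvExts
      · exact Or.inr (by rw [pvBAux, if_pos h]; exact ⟨h.2, List.suffix_refl _⟩)
      · rw [pvBAux, if_neg h]
        rcases ih with h1 | ⟨h2, h3⟩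
        · exact Or.inl h1
        · exact Or.inr ⟨h2, h3.trans (List.suffix_cons c cs)⟩

-- A's loop returns "" when nothing in the list is a suffix of r
theorem pvALoop_none (r : String) (es : List String)
    (h : ∀ e ∈ es, ¬ (e.toList <:+ r.toList)) : pvALoop r es = "" := by
  induction es with
  | nil => rfl
  | cons e es ih =>
      rw [pvALoop]
      rw [if_neg]
      · exact ih fun x hx => h x (List.mem_cons_of_mem e hx)
      · simp only [PySem.Str.endswith_eq]
        intro hc
        exact h e (List.mem_cons_self) ((PySem.Chars.endswith_iff _ _).mp hc)

-- A's loop returns b when b matches and every match is a suffix of b,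
-- provided no list element is a proper suffix of a later one (Pairwise)
theorem pvALoop_first (r : String) (b : String) (es : List String)
    (hp : es.Pairwise (fun x y => x.toList <:+ y.toList → x = y))
    (hb : b ∈ es) (hbs : b.toList <:+ r.toList)
    (hmax : ∀ e ∈ es, e.toList <:+ r.toList → e.toList <:+ b.toList) :
    pvALoop r es = b := by
  induction es with
  | nil => exact absurd hb (List.not_mem_nil)
  | cons e es ih =>
      rw [pvALoop]
      by_cases hc : PySem.Str.endswith r e = true
      · rw [if_pos hc]
        have hes : e.toList <:+ r.toList := by
          rw [PySem.Str.endswith_eq] at hc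
          exact (PySem.Chars.endswith_iff _ _).mp hc
        have heb : e.toList <:+ b.toList := hmax e List.mem_cons_self hes
        rcases List.mem_cons.mp hb with h1 | h2
        · exact h1.symm
        · exact (List.pairwise_cons.mp hp).1 b h2 heb
      · rw [if_neg hc]
        have hbne : b ≠ e := by
          intro h
          subst h
          rw [PySem.Str.endswith_eq] at hc
          exact hc ((PySem.Chars.endswith_iff _ _).mpr hbs)
        have hb' : b ∈ es := by
          rcases List.mem_cons.mp hb with h1 | h2
          · exact absurd h1 hbne
          · exact h2
        exact ih (List.pairwise_cons.mp hp).2 hb'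
          fun x hx => hmax x (List.mem_cons_of_mem e hx)

-- the concrete list has no element that is a suffix of a later element
theorem pvExtList_pairwise :
    pvExtList.Pairwise (fun x y => x.toList <:+ y.toList → x = y) := by
  decide

-- ===== VERDICT (by name: the statement is the Claim_ definition above) =====
theorem condense_ext_spec : Claim_equal_condense_ext := by
  intro r _
  unfold Spec_condense_ext condense_ext condense_ext_alt
  rcases pvBAux_sound r.toList with h0 | ⟨hm, hs⟩
  · rw [h0]
    apply pvALoop_none
    intro e he hsuf
    have : e.toList <:+ pvBAux r.toList :=
      pvBAux_longest r.toList e.toList (pvExts_eq ▸ List.mem_map_of_mem he) hsuf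
    rw [h0] at this
    have hnil : e.toList = [] := List.suffix_nil.mp this
    have := pvExts_head e.toList (pvExts_eq ▸ List.mem_map_of_mem he)
    rw [hnil] at this
    simp at this
  · rcases List.mem_map.mp (pvExts_eq ▸ hm) with ⟨b, hbm, hbe⟩
    rw [← hbe]
    rw [String.ofList_toList]
    apply pvALoop_first r b pvExtList pvExtList_pairwise hbm (hbe ▸ hs)
    intro e he hsuf
    rw [hbe]
    exact pvBAux_longest r.toList e.toList (pvExts_eq ▸ List.mem_map_of_mem he) hsuf
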